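-- pv_equiv track=rewrite | github.com/vishalshirke7/DSA | two_pointer/at-most-two-occurrences.py | solve
-- ===== SOURCE A (Python) =====
-- def solve(A):
--     count_map = {}
--     for val in A:
--         count_map[val] = count_map.get(val, 0) + 1
--     special_count = 0
--     for val in count_map:
--         if count_map[val] > 2:
--             special_count += 1
--     if special_count == 0:
--         return 0
--     end, arr_len = -1, len(A)
--     ans = arr_len
--     for index in range(arr_len):
--         while end + 1 < arr_len and special_count:
--             end += 1
--             count_map[A[end]] -= 1
--             if count_map[A[end]] == 2:
--                 special_count -= 1
--         if special_count == 0: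
--             ans = min(ans, end - index + 1)
--         count_map[A[index]] += 1
--         if count_map[A[index]] == 3:
--             special_count += 1
--     return ans
-- ===== SOURCE B (Python) =====
-- def solve(A):
--     # Occurrence-list algorithm: no sliding-window counts at all.
--     # For each over-represented value v (count > 2) collect its positions;
--     # a window starting at i must cover occurrences of v up to its
--     # (seen_before_i + count(v)-2)-th one.  Sweep i, maintaining the needed
--     # right endpoint F as a running max over position-list lookups.
--     pos = {}
--     for i, v in enumerate(A):
--         pos.setdefault(v, []).append(i)
--     over = [v for v in pos if len(pos[v]) > 2]
--     if not over:
--         return 0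
--     imax = min(pos[v][2] for v in over)
--     F = max(pos[v][len(pos[v]) - 3] for v in over)
--     best = F + 1
--     seen = {}
--     for i in range(1, imax + 1):
--         v = A[i - 1]
--         seen[v] = seen.get(v, 0) + 1
--         if len(pos[v]) > 2:
--             F = max(F, pos[v][seen[v] + len(pos[v]) - 3])
--         best = min(best, F - i + 1)
--     return best
-- ===== Notes on version B (the rewrite author's own statement) =====
-- stated objective: alternative
-- what changed: Replaces A's sliding-window with destructive count-map decrements and a 'special' counter by precomputed per-value occurrence-position lists: for each window start i the minimal right endpoint is read off by indexing the position lists of over-represented values and maintained as a running max during a single left-to-right sweep.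
import Mathlib
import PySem

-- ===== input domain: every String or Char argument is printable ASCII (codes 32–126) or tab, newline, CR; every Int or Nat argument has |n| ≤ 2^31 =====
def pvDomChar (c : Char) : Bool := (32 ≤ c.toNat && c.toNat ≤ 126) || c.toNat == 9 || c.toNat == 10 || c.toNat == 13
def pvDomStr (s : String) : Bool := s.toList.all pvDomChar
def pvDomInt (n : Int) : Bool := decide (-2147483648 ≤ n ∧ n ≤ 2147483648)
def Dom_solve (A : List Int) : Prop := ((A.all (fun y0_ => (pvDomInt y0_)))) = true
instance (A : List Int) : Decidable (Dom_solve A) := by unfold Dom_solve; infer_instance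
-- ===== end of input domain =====

-- B replaces A's sliding window (destructive count-map decrements + a 'special'
-- counter) by per-value occurrence-position lists: for each window start the
-- minimal right endpoint is read off the position lists and kept as a running
-- max during one sweep.  Objective: alternative (same O(n) cost).

-- ===== PORT A =====
-- inner 'while end + 1 < arr_len and special:' loop; the fuel passed in is the
-- number of positions to the right of 'end' (each iteration advances 'end' by
-- one and the guard re-checks 'end + 1 < arr_len', so the fuel is exact)
def solveWhile (A : List Int) (fuel : Nat) (e : Int) (d : PySem.Dict Int Int) (s : Int) :
    Int × PySem.Dict Int Int × Int :=
  match fuel with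
  | 0 => (e, d, s)
  | f + 1 =>
    if e + 1 < (A.length : Int) ∧ s ≠ 0 then
      let e' := e + 1
      let x := PySem.List.pyGetD A e' 0
      let d' := d.modify x 0 (· - 1)
      let s' := if d'.getD x 0 == 2 then s - 1 else s
      solveWhile A f e' d' s'
    else (e, d, s)

-- body of 'for index in range(arr_len):'
def solveStep (A : List Int) (st : Int × PySem.Dict Int Int × Int × Int) (idx : Int) :
    Int × PySem.Dict Int Int × Int × Int :=
  let (e, d, s, ans) := st
  let (e, d, s) := solveWhile A (((A.length : Int) - 1 - e).toNat) e d s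
  let ans := if s == 0 then min ans (e - idx + 1) else ans
  let x := PySem.List.pyGetD A idx 0
  let d := d.modify x 0 (· + 1)
  let s := if d.getD x 0 == 3 then s + 1 else s
  (e, d, s, ans)

def solve (A : List Int) : Int :=
  let countMap : PySem.Dict Int Int :=
    A.foldl (fun d x => d.insert x (d.getD x 0 + 1)) PySem.Dict.empty
  let special : Int :=
    countMap.keys.foldl (fun s v => if countMap.getD v 0 > 2 then s + 1 else s) 0
  if special == 0 then 0
  else
    ((PySem.List.pyRange 0 (A.length : Int) 1).foldl (solveStep A)
      ((-1 : Int), countMap, special, (A.length : Int))).2.2.2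

-- ===== PORT B =====
-- body of 'for i in range(1, imax + 1):'
def solveAltStep (A : List Int) (pos : PySem.Dict Int (List Int))
    (st : Int × Int × PySem.Dict Int Int) (i : Int) : Int × Int × PySem.Dict Int Int :=
  let (F, best, seen) := st
  let v := PySem.List.pyGetD A (i - 1) 0
  let seen := seen.insert v (seen.getD v 0 + 1)
  let F :=
    if 2 < (pos.getD v []).length then
      max F (PySem.List.pyGetD (pos.getD v [])
        (seen.getD v 0 + ((pos.getD v []).length : Int) - 3) 0)
    else F
  let best := min best (F - i + 1)
  (F, best, seen)

def solve_alt (A : List Int) : Int :=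
  let pos : PySem.Dict Int (List Int) :=
    (PySem.List.enumerate A).foldl
      (fun d p => d.modify p.2 [] (fun ps => ps ++ [p.1])) PySem.Dict.empty
  let overs : List Int := pos.keys.filter (fun v => 2 < (pos.getD v []).length)
  if overs.isEmpty then 0
  else
    -- 'min(...)' / 'max(...)' over a nonempty generator: min?/max? under the guard above
    let imax : Int :=
      (PySem.List.min? (overs.map (fun v => PySem.List.pyGetD (pos.getD v []) 2 0))
        (fun x => x)).getD 0
    let F0 : Int :=
      (PySem.List.max?
        (overs.map (fun v => PySem.List.pyGetD (pos.getD v []) (((pos.getD v []).length : Int) - 3) 0))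
        (fun x => x)).getD 0
    ((PySem.List.pyRange 1 (imax + 1) 1).foldl (solveAltStep A pos)
      (F0, F0 + 1, (PySem.Dict.empty : PySem.Dict Int Int))).2.1

-- ===== PRECONDITION & SPEC =====
def Spec_solve (A : List Int) (out : Int) : Prop := out = solve_alt A
instance (A : List Int) (out : Int) : Decidable (Spec_solve A out) := by unfold Spec_solve; infer_instance

-- ===== CLAIM (what is proved, stated in full; the proofs are below) =====
def Claim_equal_solve : Prop := ∀ (A : List Int), Dom_solve A → Spec_solve A (solve A)

-- ===== LEMMAS AND PROOFS =====

-- the common closed-form description both ports are proved equal to -----------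

-- positions of the occurrences of v in l, in increasing order
def pvOcc (l : List Int) (v : Int) : List Nat :=
  (List.range l.length).filter (fun k => l.getD k 0 == v)

-- number of occurrences of v among the first m elements
def pvPf (l : List Int) (v : Int) (m : Nat) : Nat := (l.take m).count v

-- the distinct over-represented values, in first-occurrence order
def pvReq (l : List Int) : List Int := (PySem.List.dedup l).filter (fun v => 2 < l.count v)

-- v still occurs more than twice outside the half-open window [i, m)
def pvBadP (l : List Int) (i m : Nat) (v : Int) : Bool :=
  pvPf l v m < pvPf l v i + (l.count v - 2)

def pvBad (l : List Int) (i m : Nat) : Nat := (pvReq l).countP (pvBadP l i m)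

def pvGood (l : List Int) (i m : Nat) : Prop := pvBad l i m = 0

-- position of the last occurrence of v a good window starting at i must cover
def pvFpos (l : List Int) (v : Int) (i : Nat) : Nat :=
  (pvOcc l v).getD (pvPf l v i + (l.count v - 3)) 0

def pvFM (l : List Int) (i : Nat) : Int :=
  ((pvReq l).map (fun v => ((pvFpos l v i : Nat) : Int))).foldl max (-1)

def pvIM (l : List Int) : Int :=
  ((pvReq l).map (fun v => (((pvOcc l v).getD 2 0 : Nat) : Int))).foldl min ((l.length : Int) - 1)

def pvSpec (l : List Int) : Int :=
  if pvReq l = [] then 0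
  else (List.range ((pvIM l).toNat + 1)).foldl
    (fun (b : Int) (i : Nat) => min b (pvFM l i - (i : Int) + 1)) (l.length : Int)

-- generic fold/count helpers ---------------------------------------------------

theorem pvFoldlMaxPull (t : List Int) : ∀ a z : Int, t.foldl max (max a z) = max (t.foldl max a) z := by
  induction t with
  | nil => intro a z; simp
  | cons x xs ih =>
    intro a z
    simp only [List.foldl_cons]
    rw [max_right_comm, ih]

theorem pvFoldlMinPull (t : List Int) : ∀ a z : Int, t.foldl min (min a z) = min (t.foldl min a) z := by
  induction t with
  | nil => intro a z; simp
  | cons x xs ih =>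
    intro a z
    simp only [List.foldl_cons]
    rw [min_right_comm, ih]

theorem pvLeFoldlMinIff (t : List Int) : ∀ a c : Int, (c ≤ t.foldl min a ↔ c ≤ a ∧ ∀ x ∈ t, c ≤ x) := by
  induction t with
  | nil => intro a c; simp
  | cons x xs ih =>
    intro a c
    simp only [List.foldl_cons, ih, le_min_iff, List.mem_cons]
    constructor
    · rintro ⟨⟨h1, h2⟩, h3⟩
      exact ⟨h1, fun y hy => hy.elim (fun e => e ▸ h2) (h3 y)⟩
    · rintro ⟨h1, h2⟩
      exact ⟨⟨h1, h2 x (Or.inl rfl)⟩, fun y hy => h2 y (Or.inr hy)⟩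

theorem pvFoldlMaxLeIff (t : List Int) : ∀ a c : Int, (t.foldl max a ≤ c ↔ a ≤ c ∧ ∀ x ∈ t, x ≤ c) := by
  induction t with
  | nil => intro a c; simp
  | cons x xs ih =>
    intro a c
    simp only [List.foldl_cons, ih, max_le_iff, List.mem_cons]
    constructor
    · rintro ⟨⟨h1, h2⟩, h3⟩
      exact ⟨h1, fun y hy => hy.elim (fun e => e ▸ h2) (h3 y)⟩
    · rintro ⟨h1, h2⟩
      exact ⟨⟨h1, h2 x (Or.inl rfl)⟩, fun y hy => h2 y (Or.inr hy)⟩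

theorem pvFoldlMinAbsorb (t : List Int) (a b x : Int) (hx : x ∈ t) (ha : x ≤ a) (hb : x ≤ b) :
    t.foldl min a = t.foldl min b := by
  match t, hx with
  | y :: t', hx =>
    have pull : ∀ (c : Int), (y :: t').foldl min c = min (t'.foldl min y) c := by
      intro c
      simp only [List.foldl_cons]
      rw [min_comm c y, ← pvFoldlMinPull]
    have hC : t'.foldl min y ≤ x := by
      rcases List.mem_cons.1 hx with h | h
      · exact h ▸ (PySem.List.foldl_min_le t' y).1
      · exact (PySem.List.foldl_min_le t' y).2 x h
    rw [pull a, pull b, min_eq_left (le_trans hC ha), min_eq_left (le_trans hC hb)]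

theorem pvFoldlMinFAbsorb (L : List Nat) (f : Nat → Int) (a b : Int) (x : Nat)
    (hx : x ∈ L) (ha : f x ≤ a) (hb : f x ≤ b) :
    L.foldl (fun c i => min c (f i)) a = L.foldl (fun c i => min c (f i)) b := by
  have h := pvFoldlMinAbsorb (L.map f) a b (f x) (List.mem_map_of_mem hx) ha hb
  rwa [List.foldl_map, List.foldl_map] at h

theorem pvFoldlMaxUpdate (L : List Int) (hnd : L.Nodup) (f g : Int → Int) (v0 : Int)
    (hv : v0 ∈ L) (hoff : ∀ v ∈ L, v ≠ v0 → g v = f v) (hge : f v0 ≤ g v0) (b : Int) :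
    (L.map g).foldl max b = max ((L.map f).foldl max b) (g v0) := by
  induction L generalizing b with
  | nil => cases hv
  | cons x xs ih =>
    by_cases hx : x = v0
    · subst hx
      have hxs : ∀ v ∈ xs, g v = f v := by
        intro v hvm
        exact hoff v (List.mem_cons_of_mem _ hvm) (fun e => (List.nodup_cons.1 hnd).1 (e ▸ hvm))
      simp only [List.map_cons, List.foldl_cons]
      rw [List.map_congr_left hxs]
      rw [show max b (g x) = max (max b (f x)) (g x) by
        rw [max_assoc, max_eq_right hge]]
      rw [pvFoldlMaxPull]
    · have h : v0 ∈ xs := by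
        rcases List.mem_cons.1 hv with h | h
        · exact absurd h.symm hx
        · exact h
      simp only [List.map_cons, List.foldl_cons]
      rw [hoff x (List.mem_cons_self) (by exact fun e => hx e)]
      exact ih (List.nodup_cons.1 hnd).2 h (fun v hvm hne => hoff v (List.mem_cons_of_mem _ hvm) hne) (max b (f x))

theorem pvCountPFlip (L : List Int) (hnd : L.Nodup) (p q : Int → Bool) (x : Int)
    (hx : x ∈ L) (hp : p x = true) (hq : q x = false) (hoff : ∀ y ∈ L, y ≠ x → q y = p y) :
    L.countP q + 1 = L.countP p := by
  induction L with
  | nil => cases hx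
  | cons y ys ih =>
    by_cases hy : y = x
    · subst hy
      have hys : ∀ v ∈ ys, q v = p v := by
        intro v hvm
        exact hoff v (List.mem_cons_of_mem _ hvm) (fun e => (List.nodup_cons.1 hnd).1 (e ▸ hvm))
      rw [List.countP_cons, List.countP_cons, hp, hq, List.countP_congr (fun v hv => by rw [hys v hv])]
      simp
    · have h : x ∈ ys := by
        rcases List.mem_cons.1 hx with h | h
        · exact absurd h.symm hy
        · exact h
      rw [List.countP_cons, List.countP_cons, hoff y (List.mem_cons_self) hy]
      have := ih (List.nodup_cons.1 hnd).2 h (fun v hvm hne => hoff v (List.mem_cons_of_mem _ hvm) hne)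
      omega

theorem pvFoldlNoop (L : List Nat) (P : Nat → Prop) [DecidablePred P] (f : Nat → Int) (a : Int)
    (h : ∀ i ∈ L, ¬ P i) :
    L.foldl (fun b i => if P i then min b (f i) else b) a = a := by
  induction L generalizing a with
  | nil => rfl
  | cons x xs ih =>
    simp only [List.foldl_cons, if_neg (h x List.mem_cons_self)]
    exact ih _ (fun i hi => h i (List.mem_cons_of_mem _ hi))

theorem pvFoldlGuardTrue (L : List Nat) (P : Nat → Prop) [DecidablePred P] (f : Nat → Int) (a : Int)
    (h : ∀ i ∈ L, P i) :
    L.foldl (fun b i => if P i then min b (f i) else b) a = L.foldl (fun b i => min b (f i)) a := by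
  exact PySem.List.foldl_congr_mem L _ _ a (fun acc x hx => by rw [if_pos (h x hx)])

theorem pvSortedGetDMono (P : List Nat) (hs : P.Pairwise (· < ·)) (a b : Nat)
    (hab : a ≤ b) (hb : b < P.length) : P.getD a 0 ≤ P.getD b 0 := by
  have ha : a < P.length := lt_of_le_of_lt hab hb
  rw [List.getD_eq_getElem P 0 ha, List.getD_eq_getElem P 0 hb]
  rcases Nat.eq_or_lt_of_le hab with rfl | h
  · exact le_refl _
  · exact le_of_lt (List.pairwise_iff_getElem.1 hs a b ha hb h)

theorem pvSortedGetDLtIff (P : List Nat) (hs : P.Pairwise (· < ·)) (k : Nat)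
    (hk : k < P.length) (m : Nat) :
    (P.getD k 0 < m ↔ k < P.countP (fun x => decide (x < m))) := by
  induction P generalizing k with
  | nil => cases hk
  | cons p t ih =>
    have hpt : ∀ q ∈ t, p < q := fun q hq => List.rel_of_pairwise_cons hs hq
    have hst : t.Pairwise (· < ·) := (List.pairwise_cons.1 hs).2
    rw [List.countP_cons]
    by_cases hpm : p < m
    · simp only [hpm, decide_true, if_true]
      match k with
      | 0 => simp [List.getD_cons_zero, hpm]
      | k + 1 =>
        have hk' : k < t.length := by simpa using hk
        simp only [List.getD_cons_succ]
        rw [ih hst k hk']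
        omega
    · have ht0 : t.countP (fun x => decide (x < m)) = 0 := by
        rw [List.countP_eq_zero]
        intro q hq
        have := hpt q hq
        simp only [decide_eq_true_eq]
        omega
      simp only [hpm, decide_false, if_false, ht0]
      match k with
      | 0 => simp [List.getD_cons_zero]; omega
      | k + 1 =>
        have hk' : k < t.length := by simpa using hk
        simp only [List.getD_cons_succ]
        constructor
        · intro h
          exfalso
          have hm : t.getD k 0 ∈ t := by
            rw [List.getD_eq_getElem t 0 hk']
            exact List.getElem_mem hk'
          have := hpt _ hm
          omega
        · intro h; exfalso; revert h; simp [ht0]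

-- prefix-count / occurrence-list facts -----------------------------------------

theorem pvPf_zero (l : List Int) (v : Int) : pvPf l v 0 = 0 := rfl

theorem pvPf_full (l : List Int) (v : Int) (m : Nat) (h : l.length ≤ m) :
    pvPf l v m = l.count v := by
  unfold pvPf
  rw [List.take_of_length_le h]

theorem pvPf_le (l : List Int) (v : Int) (m : Nat) : pvPf l v m ≤ l.count v := by
  unfold pvPf
  exact List.Sublist.count_le v (List.take_sublist m l)

theorem pvPf_mono (l : List Int) (v : Int) {m m' : Nat} (h : m ≤ m') :
    pvPf l v m ≤ pvPf l v m' := by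
  unfold pvPf
  exact List.Sublist.count_le v (List.take_sublist_take_left h)

theorem pvPf_succ (l : List Int) (v : Int) (m : Nat) (h : m < l.length) :
    pvPf l v (m + 1) = pvPf l v m + (if l.getD m 0 = v then 1 else 0) := by
  unfold pvPf
  rw [List.take_succ_eq_append_getElem h, List.count_append, List.getD_eq_getElem l 0 h]
  congr 1
  by_cases hv : l[m] = v
  · simp [hv, List.count_singleton]
  · rw [if_neg hv, List.count_eq_zero]
    simp [hv]
    exact fun e => hv e.symm

theorem pvOcc_pairwise (l : List Int) (v : Int) : (pvOcc l v).Pairwise (· < ·) := by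
  exact List.Pairwise.sublist List.filter_sublist (List.pairwise_lt_range)

theorem pvPf_eq_countP (l : List Int) (v : Int) (m : Nat) :
    pvPf l v m = (pvOcc l v).countP (fun x => decide (x < m)) := by
  unfold pvOcc
  rw [List.countP_filter]
  induction l generalizing m with
  | nil => simp [pvPf]
  | cons x t ih =>
    match m with
    | 0 =>
      rw [pvPf_zero, eq_comm, List.countP_eq_zero]
      intro k hk
      simp
    | m + 1 =>
      have hpf : pvPf (x :: t) v (m + 1) = (if x = v then 1 else 0) + pvPf t v m := by
        unfold pvPf
        by_cases hx : x = v
        · simp [hx, List.take_succ_cons, List.count_cons]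
          omega
        · simp [hx, List.take_succ_cons, List.count_cons, fun e : v = x => hx e.symm]
      rw [hpf, List.length_cons, List.range_succ_eq_map, List.countP_cons, List.countP_map]
      have hterm : ((fun a => decide (a < m + 1) && ((x :: t).getD a 0 == v)) ∘ Nat.succ)
          = (fun a => decide (a < m) && (t.getD a 0 == v)) := by
        funext a
        simp [Function.comp, Nat.succ_lt_succ_iff]
      rw [hterm, ← ih]
      by_cases hx : x = v
      · simp [hx]
        omega
      · simp [hx]

theorem pvOcc_length (l : List Int) (v : Int) : (pvOcc l v).length = l.count v := by
  have h := pvPf_eq_countP l v l.length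
  rw [pvPf_full l v l.length (le_refl _)] at h
  rw [h, eq_comm]
  apply List.countP_eq_length.2
  intro k hk
  have : k < l.length := by
    have := List.mem_range.1 (List.mem_of_mem_filter hk)
    exact this
  simpa using this

theorem pvOcc_getD_lt (l : List Int) (v : Int) (k : Nat) (hk : k < l.count v) :
    (pvOcc l v).getD k 0 < l.length := by
  have hlen : k < (pvOcc l v).length := by rwa [pvOcc_length]
  rw [List.getD_eq_getElem _ 0 hlen]
  have hmem : (pvOcc l v)[k] ∈ pvOcc l v := List.getElem_mem hlen
  exact List.mem_range.1 (List.mem_of_mem_filter hmem)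

theorem pvOcc_getD_lt_iff (l : List Int) (v : Int) (k : Nat) (hk : k < l.count v) (m : Nat) :
    ((pvOcc l v).getD k 0 < m ↔ k < pvPf l v m) := by
  have hlen : k < (pvOcc l v).length := by rwa [pvOcc_length]
  rw [pvPf_eq_countP]
  exact pvSortedGetDLtIff (pvOcc l v) (pvOcc_pairwise l v) k hlen m

-- pvReq / pvGood facts ----------------------------------------------------------

theorem pvReq_nodup (l : List Int) : (pvReq l).Nodup := by
  exact (PySem.List.nodup_dedup l).filter _


theorem pvReq_mem (l : List Int) (v : Int) : v ∈ pvReq l ↔ 2 < l.count v := by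
  unfold pvReq
  rw [List.mem_filter]
  constructor
  · rintro ⟨-, h⟩
    simpa using h
  · intro h
    refine ⟨?_, by simpa using h⟩
    rw [PySem.List.mem_dedup]
    exact List.count_pos_iff.1 (by omega)


theorem pvGood_iff (l : List Int) (i m : Nat) :
    pvGood l i m ↔ ∀ v ∈ pvReq l, pvPf l v i + (l.count v - 2) ≤ pvPf l v m := by
  unfold pvGood pvBad
  rw [List.countP_eq_zero]
  constructor
  · intro h v hv
    have := h v hv
    unfold pvBadP at this
    simpa using this
  · intro h v hv
    unfold pvBadP
    simpa using h v hv


theorem pvGood_anti (l : List Int) (i m : Nat) (hg : pvGood l (i + 1) m) : pvGood l i m := by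
  rw [pvGood_iff] at *
  intro v hv
  have h1 := hg v hv
  have h2 := pvPf_mono l v (show i ≤ i + 1 by omega)
  omega

theorem pvNotGood_of_le (l : List Int) (i m : Nat) (hreq : pvReq l ≠ []) (h : m ≤ i) :
    ¬ pvGood l i m := by
  intro hg
  rw [pvGood_iff] at hg
  match hv : pvReq l, hreq with
  | v :: t, _ =>
    have hmem : v ∈ pvReq l := by rw [hv]; exact List.mem_cons_self
    have h1 := hg v hmem
    have h2 : 2 < l.count v := (pvReq_mem l v).1 hmem
    have h3 := pvPf_mono l v h
    have h4 := pvPf_le l v i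
    omega


theorem pvLeIM_iff (l : List Int) (i : Nat) (hi : i < l.length) :
    ((i : Int) ≤ pvIM l ↔ ∀ v ∈ pvReq l, pvPf l v i ≤ 2) := by
  unfold pvIM
  rw [pvLeFoldlMinIff]
  constructor
  · rintro ⟨-, h⟩
    intro v hv
    have h2 : 2 < l.count v := (pvReq_mem l v).1 hv
    have := h _ (List.mem_map_of_mem hv)
    have hlt := (pvOcc_getD_lt_iff l v 2 h2 i).not
    push_neg at hlt
    omega
  · intro h
    refine ⟨by omega, ?_⟩
    intro x hx
    rcases List.mem_map.1 hx with ⟨v, hv, rfl⟩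
    have h2 : 2 < l.count v := (pvReq_mem l v).1 hv
    have hlt := (pvOcc_getD_lt_iff l v 2 h2 i).not
    push_neg at hlt
    have := h v hv
    omega


theorem pvIM_nonneg (l : List Int) (hreq : pvReq l ≠ []) : 0 ≤ pvIM l := by
  have hn : l ≠ [] := by
    intro e
    apply hreq
    simp [pvReq, e, PySem.List.dedup]
  have hn1 : 1 ≤ l.length := by
    cases l with
    | nil => exact absurd rfl hn
    | cons a t => simp
  unfold pvIM
  rw [pvLeFoldlMinIff]
  refine ⟨by omega, ?_⟩
  intro x hx
  rcases List.mem_map.1 hx with ⟨v, hv, rfl⟩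
  positivity


theorem pvIM_lt_len (l : List Int) (hreq : pvReq l ≠ []) : pvIM l < (l.length : Int) := by
  have hn : l ≠ [] := by
    intro e
    apply hreq
    simp [pvReq, e, PySem.List.dedup]
  have hn1 : 1 ≤ l.length := by
    cases l with
    | nil => exact absurd rfl hn
    | cons a t => simp
  unfold pvIM
  have := (PySem.List.foldl_min_le ((pvReq l).map (fun v => (((pvOcc l v).getD 2 0 : Nat) : Int))) ((l.length : Int) - 1)).1
  omega


theorem pvFM_lt_len (l : List Int) (i : Nat) (hreq : pvReq l ≠ [])
    (hIM : (i : Int) ≤ pvIM l) : pvFM l i < (l.length : Int) := by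
  have hi : i < l.length := by
    have h1 := pvIM_lt_len l hreq
    omega
  have hpf : ∀ v ∈ pvReq l, pvPf l v i ≤ 2 := (pvLeIM_iff l i hi).1 hIM
  have hle : pvFM l i ≤ (l.length : Int) - 1 := by
    unfold pvFM
    rw [pvFoldlMaxLeIff]
    have hn1 : 1 ≤ l.length := by omega
    refine ⟨by omega, ?_⟩
    intro x hx
    rcases List.mem_map.1 hx with ⟨v, hv, rfl⟩
    have h2 : 2 < l.count v := (pvReq_mem l v).1 hv
    have hk : pvPf l v i + (l.count v - 3) < l.count v := by
      have := hpf v hv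
      omega
    have hless := pvOcc_getD_lt l v _ hk
    unfold pvFpos
    omega
  omega

theorem pvFM_nonneg_witness (l : List Int) (i : Nat) (v : Int) (hv : v ∈ pvReq l) :
    ((pvFpos l v i : Nat) : Int) ≤ pvFM l i := by
  exact (PySem.List.le_foldl_max _ _).2 _ (List.mem_map_of_mem hv)


-- the central characterisation: a window [i, m) (m ≤ n) is good iff i ≤ IM and m > FM i
theorem pvGood_char (l : List Int) (i m : Nat) (hi : i < l.length) (hm : m ≤ l.length) :
    (pvGood l i m ↔ ((i : Int) ≤ pvIM l ∧ pvFM l i + 1 ≤ (m : Int))) := by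
  rw [pvGood_iff]
  constructor
  · intro h
    have hpf : ∀ v ∈ pvReq l, pvPf l v i ≤ 2 := by
      intro v hv
      have h1 := h v hv
      have h2 : 2 < l.count v := (pvReq_mem l v).1 hv
      have h3 := pvPf_le l v m
      omega
    have hIM : (i : Int) ≤ pvIM l := (pvLeIM_iff l i hi).2 hpf
    refine ⟨hIM, ?_⟩
    have hle : pvFM l i ≤ (m : Int) - 1 := by
      unfold pvFM
      rw [pvFoldlMaxLeIff]
      refine ⟨by omega, ?_⟩
      intro x hx
      rcases List.mem_map.1 hx with ⟨v, hv, rfl⟩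
      have h1 := h v hv
      have h2 : 2 < l.count v := (pvReq_mem l v).1 hv
      have hk : pvPf l v i + (l.count v - 3) < l.count v := by
        have := hpf v hv
        omega
      have hless := (pvOcc_getD_lt_iff l v _ hk m).2 (by omega)
      unfold pvFpos
      omega
    omega
  · rintro ⟨hIM, hFM⟩
    intro v hv
    have h2 : 2 < l.count v := (pvReq_mem l v).1 hv
    have hpf : pvPf l v i ≤ 2 := (pvLeIM_iff l i hi).1 hIM v hv
    have hk : pvPf l v i + (l.count v - 3) < l.count v := by omega
    have hw := pvFM_nonneg_witness l i v hv
    have hlt : (pvOcc l v).getD (pvPf l v i + (l.count v - 3)) 0 < m := by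
      unfold pvFpos at hw
      omega
    have := (pvOcc_getD_lt_iff l v _ hk m).1 hlt
    omega



-- how 'special' changes when the window is extended by l[m]
theorem pvBad_succ_right (l : List Int) (i m : Nat) (him : i ≤ m) (hm : m < l.length) :
    (pvBad l i (m + 1) : Int) =
      if ((l.count (l.getD m 0) : Int) -
            ((pvPf l (l.getD m 0) (m + 1) : Int) - (pvPf l (l.getD m 0) i : Int))) = 2
      then (pvBad l i m : Int) - 1 else (pvBad l i m : Int) := by
  set x := l.getD m 0 with hx
  have hsucc : pvPf l x (m + 1) = pvPf l x m + 1 := by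
    rw [pvPf_succ l x m hm, if_pos hx.symm]
  have hothers : ∀ y : Int, y ≠ x → pvPf l y (m + 1) = pvPf l y m := by
    intro y hy
    rw [pvPf_succ l y m hm, if_neg (fun e : l.getD m 0 = y => hy e.symm)]
    omega
  have hmono : pvPf l x i ≤ pvPf l x m := pvPf_mono l x him
  by_cases hW : ((l.count x : Int) - ((pvPf l x (m + 1) : Int) - (pvPf l x i : Int))) = 2
  · rw [if_pos hW]
    have hcnt : 2 < l.count x := by
      have h1 := pvPf_le l x (m + 1)
      omega
    have hmem : x ∈ pvReq l := (pvReq_mem l x).2 hcnt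
    have hflip := pvCountPFlip (pvReq l) (pvReq_nodup l) (pvBadP l i m) (pvBadP l i (m + 1)) x
      hmem
      (by unfold pvBadP; simp only [decide_eq_true_eq]; omega)
      (by unfold pvBadP; simp only [decide_eq_false_iff_not, not_lt]; omega)
      (by
        intro y hy hyx
        unfold pvBadP
        rw [hothers y hyx])
    unfold pvBad
    omega
  · rw [if_neg hW]
    unfold pvBad
    congr 1
    apply List.countP_congr
    intro y hy
    by_cases hyx : y = x
    · subst hyx
      have hcnt : 2 < l.count x := (pvReq_mem l x).1 hy
      unfold pvBadP
      simp only [decide_eq_true_eq]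
      omega
    · unfold pvBadP
      rw [hothers y hyx]

-- ===== A-side proof =====

-- how 'special' changes when l[i] is handed back from the window to the outside
theorem pvBad_succ_left (l : List Int) (i m : Nat) (him : i < m) (hi : i < l.length) :
    (pvBad l (i + 1) m : Int) =
      if ((l.count (l.getD i 0) : Int) -
            ((pvPf l (l.getD i 0) m : Int) - (pvPf l (l.getD i 0) (i + 1) : Int))) = 3
      then (pvBad l i m : Int) + 1 else (pvBad l i m : Int) := by
  set x := l.getD i 0 with hx
  have hsucc : pvPf l x (i + 1) = pvPf l x i + 1 := by
    rw [pvPf_succ l x i hi, if_pos hx.symm]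
  have hothers : ∀ y : Int, y ≠ x → pvPf l y (i + 1) = pvPf l y i := by
    intro y hy
    rw [pvPf_succ l y i hi, if_neg (fun e : l.getD i 0 = y => hy e.symm)]
    omega
  have hmono : pvPf l x (i + 1) ≤ pvPf l x m := pvPf_mono l x him
  by_cases hV : ((l.count x : Int) - ((pvPf l x m : Int) - (pvPf l x (i + 1) : Int))) = 3
  · rw [if_pos hV]
    have hcnt : 2 < l.count x := by
      have h1 := pvPf_le l x m
      omega
    have hmem : x ∈ pvReq l := (pvReq_mem l x).2 hcnt
    have hflip := pvCountPFlip (pvReq l) (pvReq_nodup l) (pvBadP l (i + 1) m) (pvBadP l i m) x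
      hmem
      (by unfold pvBadP; simp only [decide_eq_true_eq]; omega)
      (by unfold pvBadP; simp only [decide_eq_false_iff_not, not_lt]; omega)
      (by
        intro y hy hyx
        unfold pvBadP
        rw [hothers y hyx])
    unfold pvBad
    omega
  · rw [if_neg hV]
    unfold pvBad
    congr 1
    apply List.countP_congr
    intro y hy
    by_cases hyx : y = x
    · subst hyx
      have hcnt : 2 < l.count x := (pvReq_mem l x).1 hy
      have h1 := pvPf_le l x m
      unfold pvBadP
      simp only [decide_eq_true_eq]
      omega
    · unfold pvBadP
      rw [hothers y hyx]

theorem solveWhile_spec (l : List Int) (hreq : pvReq l ≠ []) :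
    ∀ (fuel : Nat) (i m : Nat) (d : PySem.Dict Int Int),
      fuel = l.length - m → i ≤ m → m ≤ l.length →
      (∀ v : Int, d.getD v 0 = (l.count v : Int) - ((pvPf l v m : Int) - (pvPf l v i : Int))) →
      (∀ m' < m, ¬ pvGood l i m') →
      ∃ (m' : Nat) (d' : PySem.Dict Int Int),
        solveWhile l fuel ((m : Int) - 1) d ((pvBad l i m : Int)) =
          (((m' : Int) - 1), d', ((pvBad l i m' : Int))) ∧
        m ≤ m' ∧ m' ≤ l.length ∧
        (∀ v : Int, d'.getD v 0 = (l.count v : Int) - ((pvPf l v m' : Int) - (pvPf l v i : Int))) ∧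
        (∀ m'' < m', ¬ pvGood l i m'') ∧
        (pvGood l i m' ∨ m' = l.length) := by
  intro fuel
  induction fuel with
  | zero =>
    intro i m d hf him hmn hd hmin
    have hmn' : m = l.length := by omega
    exact ⟨m, d, rfl, le_refl m, hmn, hd, hmin, Or.inr hmn'⟩
  | succ f ih =>
    intro i m d hf him hmn hd hmin
    have hmlt : m < l.length := by omega
    by_cases hbad : pvBad l i m = 0
    · -- 'special' is zero: the while guard fails, loop exits immediately
      refine ⟨m, d, ?_, le_refl m, hmn, hd, hmin, Or.inl hbad⟩
      show (if ((m : Int) - 1) + 1 < (l.length : Int) ∧ ((pvBad l i m : Int)) ≠ 0 then _ else _) = _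
      rw [if_neg]
      · rintro ⟨-, hne⟩
        exact hne (by rw [hbad]; rfl)
    · -- guard holds: extend the window by l[m] and recurse
      have hx : PySem.List.pyGetD l (((m : Int) - 1) + 1) 0 = l.getD m 0 := by
        rw [show ((m : Int) - 1) + 1 = ((m : Nat) : Int) by ring, PySem.List.pyGetD_natCast]
      set x := l.getD m 0 with hxv
      have hsucc : pvPf l x (m + 1) = pvPf l x m + 1 := by
        rw [pvPf_succ l x m hmlt, if_pos hxv.symm]
      have hothers : ∀ y : Int, y ≠ x → pvPf l y (m + 1) = pvPf l y m := by
        intro y hy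
        rw [pvPf_succ l y m hmlt, if_neg (fun e : l.getD m 0 = y => hy e.symm)]
        omega
      have hd' : ∀ v : Int, (d.modify x 0 (· - 1)).getD v 0 =
          (l.count v : Int) - ((pvPf l v (m + 1) : Int) - (pvPf l v i : Int)) := by
        intro v
        by_cases hvx : v = x
        · subst hvx
          rw [PySem.Dict.getD_modify_self, hd x, hsucc]
          push_cast
          ring
        · rw [PySem.Dict.getD_modify_of_ne d 0 (· - 1) hvx, hd v, hothers v hvx]
      have hs' : (if (d.modify x 0 (· - 1)).getD x 0 == 2 then ((pvBad l i m : Int)) - 1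
            else ((pvBad l i m : Int))) = (pvBad l i (m + 1) : Int) := by
        rw [pvBad_succ_right l i m him hmlt]
        rw [hd' x]
        by_cases h2 : ((l.count x : Int) - ((pvPf l x (m + 1) : Int) - (pvPf l x i : Int))) = 2
        · rw [if_pos h2, if_pos (by exact beq_iff_eq.2 h2)]
        · rw [if_neg h2, if_neg (by simpa using h2)]
      have hmin' : ∀ m'' < m + 1, ¬ pvGood l i m'' := by
        intro m'' hm''
        rcases Nat.lt_succ_iff_lt_or_eq.1 hm'' with h | rfl
        · exact hmin m'' h
        · exact hbad
      obtain ⟨m', d', heq, hle, hmn2, hd2, hmin2, hgood2⟩ :=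
        ih i (m + 1) (d.modify x 0 (· - 1)) (by omega) (by omega) (by omega) hd' hmin'
      refine ⟨m', d', ?_, by omega, hmn2, hd2, hmin2, hgood2⟩
      show (if ((m : Int) - 1) + 1 < (l.length : Int) ∧ ((pvBad l i m : Int)) ≠ 0 then _ else _) = _
      rw [if_pos ⟨by push_cast; omega, by
        intro hz
        apply hbad
        exact_mod_cast hz⟩]
      simp only [hx]
      rw [show ((m : Int) - 1) + 1 = (((m + 1 : Nat) : Int) - 1) by push_cast; ring]
      rw [hs']
      exact heq


def pvAnsSpec (l : List Int) (k : Nat) : Int :=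
  (List.range k).foldl
    (fun (b : Int) (i : Nat) => if (i : Int) ≤ pvIM l then min b (pvFM l i - (i : Int) + 1) else b)
    (l.length : Int)

theorem pvAnsSpec_succ (l : List Int) (k : Nat) :
    pvAnsSpec l (k + 1) =
      if (k : Int) ≤ pvIM l then min (pvAnsSpec l k) (pvFM l k - (k : Int) + 1)
      else pvAnsSpec l k := by
  unfold pvAnsSpec
  rw [List.range_succ, List.foldl_append]
  rfl

theorem solve_fold_spec (l : List Int) (hreq : pvReq l ≠ []) :
    ∀ (k : Nat), k ≤ l.length →
      ∃ (m : Nat) (d : PySem.Dict Int Int),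
        (PySem.List.pyRange 0 (k : Int) 1).foldl (solveStep l)
          ((-1 : Int), PySem.Dict.counter l, ((pvReq l).length : Int), (l.length : Int)) =
          (((m : Int) - 1), d, ((pvBad l k m : Int)), pvAnsSpec l k) ∧
        k ≤ m ∧ m ≤ l.length ∧
        (∀ v : Int, d.getD v 0 = (l.count v : Int) - ((pvPf l v m : Int) - (pvPf l v k : Int))) ∧
        (∀ m' < m, ¬ pvGood l k m') := by
  intro k
  induction k with
  | zero =>
    intro hk
    refine ⟨0, PySem.Dict.counter l, ?_, le_refl 0, by omega, ?_, by omega⟩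
    · rw [PySem.List.pyRange_one_eq_nil (by omega)]
      have hbad0 : pvBad l 0 0 = (pvReq l).length := by
        unfold pvBad
        apply List.countP_eq_length.2
        intro v hv
        have h2 : 2 < l.count v := (pvReq_mem l v).1 hv
        unfold pvBadP
        simp only [decide_eq_true_eq, pvPf_zero]
        omega
      rw [hbad0]
      rfl
    · intro v
      rw [PySem.Dict.getD_counter, pvPf_zero]
      push_cast
      ring
  | succ k ihk =>
    intro hk1
    have hk : k ≤ l.length := by omega
    have hklt : k < l.length := by omega
    obtain ⟨m, d, heq, hkm, hmn, hd, hmin⟩ := ihk hk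
    rw [show ((k + 1 : Nat) : Int) = (k : Int) + 1 by push_cast; ring,
      PySem.List.pyRange_one_succ_right (by omega), List.foldl_append, heq]
    -- run the inner while loop
    obtain ⟨m', d', hweq, hmm', hm'n, hd', hmin', hgood'⟩ :=
      solveWhile_spec l hreq (l.length - m) k m d rfl hkm hmn hd hmin
    have hkm' : k < m' := by
      rcases hgood' with hg | hg
      · by_contra hc
        exact pvNotGood_of_le l k m' hreq (by omega) hg
      · omega
    -- value of the recorded answer
    have hans : (if ((pvBad l k m' : Int)) == 0
          then min (pvAnsSpec l k) ((((m' : Int) - 1)) - (k : Int) + 1) else pvAnsSpec l k)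
        = pvAnsSpec l (k + 1) := by
      rw [pvAnsSpec_succ]
      by_cases hb : pvBad l k m' = 0
      · have hgood : pvGood l k m' := hb
        have hchar := (pvGood_char l k m' hklt hm'n).1 hgood
        have hm'1 : 1 ≤ m' := by omega
        have hnotg : ¬ pvGood l k (m' - 1) := hmin' (m' - 1) (by omega)
        have hup : ¬ ((k : Int) ≤ pvIM l ∧ pvFM l k + 1 ≤ ((m' - 1 : Nat) : Int)) :=
          fun hcc => hnotg ((pvGood_char l k (m' - 1) hklt (by omega)).2 hcc)
        have hmFM : (m' : Int) = pvFM l k + 1 := by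
          rcases hchar with ⟨hIM, hFM⟩
          by_contra hne
          exact hup ⟨hIM, by push_cast; omega⟩
        rw [if_pos (by rw [hb]; rfl), if_pos hchar.1]
        congr 1
        omega
      · have hm'eq : m' = l.length := by
          rcases hgood' with hg | hg
          · exact absurd hg hb
          · exact hg
        have hnotIM : ¬ ((k : Int) ≤ pvIM l) := by
          intro hIM
          apply hb
          apply (pvGood_char l k m' hklt hm'n).2
          refine ⟨hIM, ?_⟩
          have := pvFM_lt_len l k hreq hIM
          omega
        rw [if_neg (by simpa using hb), if_neg hnotIM]
    -- hand l[k] back to the outside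
    have hxk : PySem.List.pyGetD l ((k : Nat) : Int) 0 = l.getD k 0 := PySem.List.pyGetD_natCast l k 0
    set x := l.getD k 0 with hxv
    have hsucc : pvPf l x (k + 1) = pvPf l x k + 1 := by
      rw [pvPf_succ l x k hklt, if_pos hxv.symm]
    have hothers : ∀ y : Int, y ≠ x → pvPf l y (k + 1) = pvPf l y k := by
      intro y hy
      rw [pvPf_succ l y k hklt, if_neg (fun e : l.getD k 0 = y => hy e.symm)]
      omega
    have hd'' : ∀ v : Int, ((d'.modify x 0 (· + 1)).getD v 0 =
        (l.count v : Int) - ((pvPf l v m' : Int) - (pvPf l v (k + 1) : Int))) := by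
      intro v
      by_cases hvx : v = x
      · subst hvx
        rw [PySem.Dict.getD_modify_self, hd' x, hsucc]
        push_cast
        ring
      · rw [PySem.Dict.getD_modify_of_ne d' 0 (· + 1) hvx, hd' v, hothers v hvx]
    have hs'' : (if (d'.modify x 0 (· + 1)).getD x 0 == 3 then ((pvBad l k m' : Int)) + 1
          else ((pvBad l k m' : Int))) = (pvBad l (k + 1) m' : Int) := by
      rw [pvBad_succ_left l k m' hkm' hklt]
      rw [hd'' x]
      by_cases h3 : ((l.count x : Int) - ((pvPf l x m' : Int) - (pvPf l x (k + 1) : Int))) = 3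
      · rw [if_pos h3, if_pos (by exact beq_iff_eq.2 h3)]
      · rw [if_neg h3, if_neg (by simpa using h3)]
    have hmin'' : ∀ m'' < m', ¬ pvGood l (k + 1) m'' := by
      intro m'' hm''
      exact fun hg => hmin' m'' hm'' (pvGood_anti l k m'' hg)
    refine ⟨m', d'.modify x 0 (· + 1), ?_, by omega, hm'n, hd'', hmin''⟩
    -- now reduce one application of solveStep
    show solveStep l (((m : Int) - 1), d, ((pvBad l k m : Int)), pvAnsSpec l k) (k : Int) = _
    unfold solveStep
    have hfuel : (((l.length : Int)) - 1 - (((m : Int)) - 1)).toNat = l.length - m := by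
      omega
    simp only [hfuel, hweq, hxk, hans, hs'']


theorem pvAnsSpec_full (l : List Int) (hreq : pvReq l ≠ []) :
    pvAnsSpec l l.length = pvSpec l := by
  have h0 := pvIM_nonneg l hreq
  have h1 := pvIM_lt_len l hreq
  have hrange : List.range l.length =
      List.range ((pvIM l).toNat + 1) ++
        (List.range (l.length - ((pvIM l).toNat + 1))).map (fun x => (pvIM l).toNat + 1 + x) := by
    rw [← List.range_add]
    congr 1
    omega
  unfold pvAnsSpec pvSpec
  rw [if_neg hreq, hrange, List.foldl_append]
  rw [pvFoldlNoop _ _ _ _ (by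
    intro i hi
    rcases List.mem_map.1 hi with ⟨j, hj, rfl⟩
    push_cast
    omega)]
  rw [pvFoldlGuardTrue _ _ _ _ (by
    intro i hi
    have := List.mem_range.1 hi
    omega)]

theorem solveA_eq_spec (l : List Int) : solve l = pvSpec l := by
  unfold solve
  dsimp only
  rw [PySem.Dict.foldl_insert_getD_add_one_eq_counter]
  have hkeys : (PySem.Dict.counter l).keys = PySem.List.dedup l := by
    rw [PySem.Dict.keys_counter, ← PySem.List.dedup_eq_ofList]
  have hcnt : (PySem.List.dedup l).countP (fun w => decide ((PySem.Dict.counter l).getD w 0 > 2))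
      = (pvReq l).length := by
    have hiff : ∀ w ∈ PySem.List.dedup l,
        ((fun w => decide ((PySem.Dict.counter l).getD w 0 > 2)) w = true
          ↔ (fun w => decide (2 < l.count w)) w = true) := by
      intro w _
      simp only [PySem.Dict.getD_counter, decide_eq_true_eq]
      constructor
      · intro h
        exact_mod_cast h
      · intro h
        exact_mod_cast h
    rw [List.countP_congr hiff, List.countP_eq_length_filter]
    rfl
  have hconv := PySem.List.foldl_congr_mem (PySem.List.dedup l)
    (fun (s : Int) (v : Int) => if (PySem.Dict.counter l).getD v 0 > 2 then s + 1 else s)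
    (fun (s : Int) (v : Int) =>
      if (fun w => decide ((PySem.Dict.counter l).getD w 0 > 2)) v = true then s + 1 else s)
    0
    (by
      intro acc x _
      dsimp only
      by_cases h : (PySem.Dict.counter l).getD x 0 > 2
      · rw [if_pos h, if_pos (by simpa using h)]
      · rw [if_neg h, if_neg (by simpa using h)])
  have hspecial : (PySem.Dict.counter l).keys.foldl
      (fun (s : Int) (v : Int) => if (PySem.Dict.counter l).getD v 0 > 2 then s + 1 else s) 0
      = ((pvReq l).length : Int) := by
    rw [hkeys, hconv, PySem.List.foldl_count_if, hcnt]
    ring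
  rw [hspecial]
  by_cases hr : pvReq l = []
  · rw [if_pos (by rw [hr]; rfl)]
    rw [pvSpec, if_pos hr]
  · rw [if_neg (by
      have hlen : (pvReq l).length ≠ 0 := fun e => hr (List.length_eq_zero_iff.1 e)
      simp only [beq_iff_eq]
      exact_mod_cast hlen)]
    obtain ⟨m, d, heq, -, -, -, -⟩ := solve_fold_spec l hr l.length (le_refl _)
    rw [heq]
    exact pvAnsSpec_full l hr

theorem pvPos_getD (l : List Int) (v : Int) :
    ((PySem.List.enumerate l).foldl
        (fun d p => d.modify p.2 [] (fun ps => ps ++ [p.1]))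
        (PySem.Dict.empty : PySem.Dict Int (List Int))).getD v [] =
      (pvOcc l v).map (fun k : Nat => (k : Int)) := by
  have hswap : (PySem.List.enumerate l).foldl
      (fun d p => d.modify p.2 [] (fun ps => ps ++ [p.1]))
      (PySem.Dict.empty : PySem.Dict Int (List Int)) =
      (((PySem.List.enumerate l).map (fun p => (p.2, p.1))).foldl
        (fun d q => d.modify q.1 [] (fun ps => ps ++ [q.2]))
        (PySem.Dict.empty : PySem.Dict Int (List Int))) := by
    rw [List.foldl_map]
  rw [hswap, PySem.Dict.getD_foldl_modify_append]
  have hempty : (PySem.Dict.empty : PySem.Dict Int (List Int)).getD v [] = [] := by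
    rfl
  rw [hempty, List.nil_append, List.filter_map, List.map_map]
  have henum : PySem.List.enumerate l =
      (List.range l.length).map ((fun j => (j, PySem.List.pyGetD l j 0)) ∘ (fun k : Nat => (k : Int))) := by
    rw [PySem.List.enumerate_eq_map_pyRange l 0]
    rw [show PySem.List.len l = (l.length : Int) from PySem.List.len_eq l]
    rw [PySem.List.pyRange_zero_nat, List.map_map]
  rw [henum, List.filter_map, List.map_map]
  unfold pvOcc
  simp only [Function.comp_def, PySem.List.pyGetD_natCast]

theorem pvPos_keys (l : List Int) :
    ((PySem.List.enumerate l).foldl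
        (fun d p => d.modify p.2 [] (fun ps => ps ++ [p.1]))
        (PySem.Dict.empty : PySem.Dict Int (List Int))).keys = PySem.List.dedup l := by
  have h := PySem.Dict.keys_foldl_modify_key (PySem.List.enumerate l) (fun p => p.2)
    ([] : List Int) (fun _ p ps => ps ++ [p.1])
    (PySem.Dict.empty : PySem.Dict Int (List Int))
  rw [h, PySem.List.map_snd_enumerate]
  rw [show (PySem.Dict.empty : PySem.Dict Int (List Int)).keys = ([] : List Int) from rfl]
  rw [PySem.Set.update_nil_left, ← PySem.List.dedup_eq_ofList]

def pvBestSpec (l : List Int) (k : Nat) : Int :=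
  (List.range (k + 1)).foldl (fun (b : Int) (i : Nat) => min b (pvFM l i - (i : Int) + 1))
    (pvFM l 0 + 1)

theorem pvFM_succ_of_req (l : List Int) (k : Nat) (hk : k < l.length)
    (hpf : pvPf l (l.getD k 0) (k + 1) ≤ 2) (hcnt : 2 < l.count (l.getD k 0)) :
    pvFM l (k + 1) = max (pvFM l k) ((pvFpos l (l.getD k 0) (k + 1) : Nat) : Int) := by
  set x := l.getD k 0 with hxv
  have hsucc : pvPf l x (k + 1) = pvPf l x k + 1 := by
    rw [pvPf_succ l x k hk, if_pos hxv.symm]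
  have hothers : ∀ y : Int, y ≠ x → pvPf l y (k + 1) = pvPf l y k := by
    intro y hy
    rw [pvPf_succ l y k hk, if_neg (fun e : l.getD k 0 = y => hy e.symm)]
    omega
  have hmem : x ∈ pvReq l := (pvReq_mem l x).2 hcnt
  unfold pvFM
  rw [pvFoldlMaxUpdate (pvReq l) (pvReq_nodup l)
    (fun w => ((pvFpos l w k : Nat) : Int)) (fun w => ((pvFpos l w (k + 1) : Nat) : Int)) x hmem
    (by
      intro w hw hwx
      dsimp only
      unfold pvFpos
      rw [hothers w hwx])
    (by
      dsimp only
      have hmono := pvSortedGetDMono (pvOcc l x) (pvOcc_pairwise l x)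
        (pvPf l x k + (l.count x - 3)) (pvPf l x (k + 1) + (l.count x - 3))
        (by omega) (by rw [pvOcc_length]; omega)
      unfold pvFpos
      exact_mod_cast hmono)
    (-1)]

theorem pvFM_succ_of_nreq (l : List Int) (k : Nat) (hk : k < l.length)
    (hcnt : ¬ 2 < l.count (l.getD k 0)) :
    pvFM l (k + 1) = pvFM l k := by
  unfold pvFM
  congr 1
  apply List.map_congr_left
  intro w hw
  have hwx : w ≠ l.getD k 0 := by
    intro e
    exact hcnt (e ▸ (pvReq_mem l w).1 hw)
  unfold pvFpos
  rw [pvPf_succ l w k hk, if_neg (fun e : l.getD k 0 = w => hwx e.symm)]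
  norm_num

theorem solveB_loop (l : List Int) (pos : PySem.Dict Int (List Int))
    (hpos : ∀ v : Int, pos.getD v [] = (pvOcc l v).map (fun k : Nat => (k : Int)))
    (hreq : pvReq l ≠ []) :
    ∀ k : Nat, k ≤ (pvIM l).toNat →
      ∃ seen : PySem.Dict Int Int,
        (PySem.List.pyRange 1 ((k : Int) + 1) 1).foldl (solveAltStep l pos)
          (pvFM l 0, pvFM l 0 + 1, (PySem.Dict.empty : PySem.Dict Int Int)) =
          (pvFM l k, pvBestSpec l k, seen) ∧
        (∀ v : Int, seen.getD v 0 = (pvPf l v k : Int)) := by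
  have hIM0 := pvIM_nonneg l hreq
  have hIMn := pvIM_lt_len l hreq
  intro k
  induction k with
  | zero =>
    intro _
    refine ⟨PySem.Dict.empty, ?_, ?_⟩
    · rw [PySem.List.pyRange_one_eq_nil (by omega)]
      unfold pvBestSpec
      show (pvFM l 0, pvFM l 0 + 1, _) = _
      have : (List.range 1).foldl (fun (b : Int) (i : Nat) => min b (pvFM l i - (i : Int) + 1))
          (pvFM l 0 + 1) = pvFM l 0 + 1 := by
        show min (pvFM l 0 + 1) (pvFM l 0 - ((0 : Nat) : Int) + 1) = pvFM l 0 + 1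
        push_cast
        omega
      rw [this]
    · intro v
      rw [pvPf_zero]
      rfl
  | succ k ih =>
    intro hk1
    have hkIM : k ≤ (pvIM l).toNat := by omega
    have hkn : k < l.length := by omega
    have hk1n : k + 1 < l.length := by omega
    obtain ⟨seen, heq, hseen⟩ := ih hkIM
    rw [show ((k + 1 : Nat) : Int) + 1 = ((k : Int) + 1) + 1 by push_cast; ring,
      PySem.List.pyRange_one_succ_right (by omega), List.foldl_append, heq]
    simp only [List.foldl_cons, List.foldl_nil]
    -- one step of the sweep
    have hvx : PySem.List.pyGetD l ((k : Int) + 1 - 1) 0 = l.getD k 0 := by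
      rw [show (k : Int) + 1 - 1 = ((k : Nat) : Int) by ring, PySem.List.pyGetD_natCast]
    set x := l.getD k 0 with hxv
    have hsucc : pvPf l x (k + 1) = pvPf l x k + 1 := by
      rw [pvPf_succ l x k hkn, if_pos hxv.symm]
    have hothers : ∀ y : Int, y ≠ x → pvPf l y (k + 1) = pvPf l y k := by
      intro y hy
      rw [pvPf_succ l y k hkn, if_neg (fun e : l.getD k 0 = y => hy e.symm)]
      omega
    have hseen' : ∀ v : Int, (seen.insert x (seen.getD x 0 + 1)).getD v 0 = (pvPf l v (k + 1) : Int) := by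
      intro v
      by_cases hvx' : v = x
      · subst hvx'
        rw [PySem.Dict.getD_insert_self, hseen x, hsucc]
        push_cast
        ring
      · rw [PySem.Dict.getD_insert_of_ne seen _ _ hvx', hseen v, hothers v hvx']
    have hlenpos : (pos.getD x []).length = l.count x := by
      rw [hpos x, List.length_map, pvOcc_length]
    refine ⟨seen.insert x (seen.getD x 0 + 1), ?_, hseen'⟩
    unfold solveAltStep
    dsimp only
    rw [hvx]
    by_cases hcnt : 2 < l.count x
    · have hmemx : x ∈ pvReq l := (pvReq_mem l x).2 hcnt
      have hpf1 : pvPf l x (k + 1) ≤ 2 := by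
        have h1 : ((k + 1 : Nat) : Int) ≤ pvIM l := by push_cast; omega
        exact (pvLeIM_iff l (k + 1) hk1n).1 h1 x hmemx
      have hidx : pvPf l x (k + 1) + (l.count x - 3) < l.count x := by omega
      have hidxlen : pvPf l x (k + 1) + (l.count x - 3) < (pvOcc l x).length := by
        rw [pvOcc_length]
        exact hidx
      have hargs : (seen.insert x (seen.getD x 0 + 1)).getD x 0 + ((pos.getD x []).length : Int) - 3
          = ((pvPf l x (k + 1) + (l.count x - 3) : Nat) : Int) := by
        rw [hseen' x, hlenpos]
        push_cast
        omega
      have hget : PySem.List.pyGetD (pos.getD x [])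
          ((seen.insert x (seen.getD x 0 + 1)).getD x 0 + ((pos.getD x []).length : Int) - 3) 0
          = ((pvFpos l x (k + 1) : Nat) : Int) := by
        rw [hargs, hpos x, PySem.List.pyGetD_ofNat _ _ _ (by rwa [List.length_map]),
          List.getElem_map]
        unfold pvFpos
        rw [List.getD_eq_getElem _ 0 hidxlen]
      rw [if_pos (by rwa [hlenpos]), hget, ← pvFM_succ_of_req l k hkn hpf1 hcnt]
      have hbs : pvBestSpec l (k + 1) = min (pvBestSpec l k) (pvFM l (k + 1) - ((k : Int) + 1) + 1) := by
        show (List.range (k + 1 + 1)).foldl _ _ = _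
        rw [List.range_succ, List.foldl_append]
        simp only [List.foldl_cons, List.foldl_nil]
        norm_num
        rfl
      rw [hbs]
    · rw [if_neg (by rwa [hlenpos]), ← pvFM_succ_of_nreq l k hkn hcnt]
      have hbs : pvBestSpec l (k + 1) = min (pvBestSpec l k) (pvFM l (k + 1) - ((k : Int) + 1) + 1) := by
        show (List.range (k + 1 + 1)).foldl _ _ = _
        rw [List.range_succ, List.foldl_append]
        simp only [List.foldl_cons, List.foldl_nil]
        norm_num
        rfl
      rw [hbs]

theorem solveB_eq_spec (l : List Int) : solve_alt l = pvSpec l := by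
  unfold solve_alt
  dsimp only
  rw [pvPos_keys l]
  set pos := (PySem.List.enumerate l).foldl
      (fun d p => d.modify p.2 [] (fun ps => ps ++ [p.1]))
      (PySem.Dict.empty : PySem.Dict Int (List Int)) with hposdef
  have hpos : ∀ v : Int, pos.getD v [] = (pvOcc l v).map (fun k : Nat => (k : Int)) :=
    pvPos_getD l
  have hover : (PySem.List.dedup l).filter (fun v => decide (2 < (pos.getD v []).length))
      = pvReq l := by
    apply List.filter_congr
    intro v _
    rw [hpos v, List.length_map, pvOcc_length]
  rw [hover]
  by_cases hr : pvReq l = []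
  · rw [if_pos (by rw [hr]; rfl), pvSpec, if_pos hr]
  · have hIM0 := pvIM_nonneg l hr
    have hIMn := pvIM_lt_len l hr
    rw [if_neg (by simpa [List.isEmpty_iff] using hr)]
    have hmapmin : (pvReq l).map (fun v => PySem.List.pyGetD (pos.getD v []) 2 0)
        = (pvReq l).map (fun v => (((pvOcc l v).getD 2 0 : Nat) : Int)) := by
      apply List.map_congr_left
      intro v hv
      have hc : 2 < l.count v := (pvReq_mem l v).1 hv
      rw [hpos v]
      have h2 : (2 : Nat) < ((pvOcc l v).map (fun k : Nat => (k : Int))).length := by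
        rw [List.length_map, pvOcc_length]
        exact hc
      rw [show (2 : Int) = ((2 : Nat) : Int) from rfl, PySem.List.pyGetD_ofNat _ _ _ h2,
        List.getElem_map]
      congr 1
      rw [List.getD_eq_getElem _ 0 (by rw [pvOcc_length]; exact hc)]
    have hmapmax : (pvReq l).map
        (fun v => PySem.List.pyGetD (pos.getD v []) (((pos.getD v []).length : Int) - 3) 0)
        = (pvReq l).map (fun v => ((pvFpos l v 0 : Nat) : Int)) := by
      apply List.map_congr_left
      intro v hv
      have hc : 2 < l.count v := (pvReq_mem l v).1 hv
      rw [hpos v]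
      have hlen : ((pvOcc l v).map (fun k : Nat => (k : Int))).length = l.count v := by
        rw [List.length_map, pvOcc_length]
      have hidx : l.count v - 3 < (pvOcc l v).length := by
        rw [pvOcc_length]
        omega
      rw [hlen, show ((l.count v : Int)) - 3 = ((l.count v - 3 : Nat) : Int) by push_cast; omega]
      rw [PySem.List.pyGetD_ofNat _ _ _ (by rw [List.length_map]; exact hidx), List.getElem_map]
      unfold pvFpos
      rw [pvPf_zero, Nat.zero_add, List.getD_eq_getElem _ 0 hidx]
    rw [hmapmin, hmapmax]
    match hreq : pvReq l, hr with
    | x :: t, _ =>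
      have hmemx : x ∈ pvReq l := by rw [hreq]; exact List.mem_cons_self
      have hcx : 2 < l.count x := (pvReq_mem l x).1 hmemx
      simp only [List.map_cons, PySem.List.min?_id_cons, PySem.List.max?_id_cons, Option.getD_some]
      have hIMeq : (t.map (fun v => (((pvOcc l v).getD 2 0 : Nat) : Int))).foldl min
          ((((pvOcc l x).getD 2 0 : Nat) : Int)) = pvIM l := by
        unfold pvIM
        rw [hreq, List.map_cons, List.foldl_cons]
        have hx2 : (pvOcc l x).getD 2 0 < l.length := pvOcc_getD_lt l x 2 hcx
        rw [show min ((l.length : Int) - 1) (((pvOcc l x).getD 2 0 : Nat) : Int)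
            = (((pvOcc l x).getD 2 0 : Nat) : Int) by omega]
      have hFMeq : (t.map (fun v => ((pvFpos l v 0 : Nat) : Int))).foldl max
          (((pvFpos l x 0 : Nat) : Int)) = pvFM l 0 := by
        unfold pvFM
        rw [hreq, List.map_cons, List.foldl_cons]
        rw [show max (-1 : Int) (((pvFpos l x 0 : Nat) : Int))
            = (((pvFpos l x 0 : Nat) : Int)) by omega]
      rw [hIMeq, hFMeq]
      obtain ⟨seen, hloop, -⟩ := solveB_loop l pos hpos hr ((pvIM l).toNat) (le_refl _)
      rw [show pvIM l + 1 = (((pvIM l).toNat : Nat) : Int) + 1 by omega, hloop]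
      show pvBestSpec l (pvIM l).toNat = pvSpec l
      unfold pvBestSpec pvSpec
      rw [if_neg hr]
      apply pvFoldlMinFAbsorb _ _ _ _ 0 (List.mem_range.2 (by omega))
      · push_cast
        omega
      · have := pvFM_lt_len l 0 hr (by push_cast; omega)
        push_cast
        omega

-- ===== VERDICT (by name: the statement is the Claim_ definition above) =====
theorem solve_spec : Claim_equal_solve := by
  intro A _
  unfold Spec_solve
  rw [solveA_eq_spec, solveB_eq_spec]
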